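-- pv_equiv track=rewrite | github.com/JhaoZ/leetcode-sols | 3890-smallest-subarray-to-sort-in-every-sliding-window/smallest-subarray-to-sort-in-every-sliding-window.py | minSubarraySort
-- ===== SOURCE A (Python) =====
-- from typing import List
--
-- def minSubarraySort(nums: List[int], k: int) -> List[int]:
--     def min_unsorted_length(window: List[int]) -> int:
--         n = len(window)
--
--         # Step 1: Find the first index where order breaks (left to right)
--         start = 0
--         while start < n - 1 and window[start] <= window[start + 1]:
--             start += 1
--
--         if start == n - 1:
--             return 0  # Already sorted
--
--         # Step 2: Find the last index where order breaks (right to left)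
--         end = n - 1
--         while end > 0 and window[end - 1] <= window[end]:
--             end -= 1
--
--         # Step 3: Find min and max in the unsorted region
--         min_unsorted = min(window[start:end+1])
--         max_unsorted = max(window[start:end+1])
--
--         # Step 4: Expand boundaries
--         while start > 0 and window[start - 1] > min_unsorted:
--             start -= 1
--         while end < n - 1 and window[end + 1] < max_unsorted:
--             end += 1
--
--         return end - start + 1
--
--     ans = []
--     for start in range(len(nums) - k + 1):
--         window = nums[start:start + k]
--         ans.append(min_unsorted_length(window))
--     return ans
-- ===== SOURCE B (Python) =====
-- def minSubarraySort(nums, k):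
--     def helper(w):
--         s = sorted(w)
--         mism = [i for i in range(len(w)) if w[i] != s[i]]
--         if not mism:
--             return 0
--         return mism[-1] - mism[0] + 1
--     return [helper(nums[i:i + k]) for i in range(len(nums) - k + 1)]
-- ===== Notes on version B (the rewrite author's own statement) =====
-- stated objective: simpler
-- what changed: Replaces A's four-phase break-detection / min-max / boundary-expansion loops per window by a single sort-and-compare: sort a copy of the window and return last-mismatch - first-mismatch + 1 (0 if none).
import Mathlib
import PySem

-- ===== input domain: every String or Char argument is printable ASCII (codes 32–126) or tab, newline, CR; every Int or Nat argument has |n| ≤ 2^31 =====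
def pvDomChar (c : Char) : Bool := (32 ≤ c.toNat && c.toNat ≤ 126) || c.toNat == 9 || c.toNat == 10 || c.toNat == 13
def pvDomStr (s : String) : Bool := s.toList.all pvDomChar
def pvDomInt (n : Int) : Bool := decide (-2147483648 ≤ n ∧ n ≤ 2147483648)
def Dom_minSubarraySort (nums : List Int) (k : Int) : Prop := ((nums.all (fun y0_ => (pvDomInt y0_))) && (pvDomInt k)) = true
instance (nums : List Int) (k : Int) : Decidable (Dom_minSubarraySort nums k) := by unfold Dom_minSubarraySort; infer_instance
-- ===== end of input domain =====

-- B replaces A's break-detect / min-max / expand loops per window by sort-and-compare (simpler, same cost up to a log factor).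


-- ===== PORT A =====
-- Loop "while start < n - 1 and window[start] <= window[start + 1]: start += 1".
-- Indices are kept as Nat (the guards keep every Python index in 0..n-1, where window[i] = getD i 0).
-- (the loop runs at most len(window) times, so it is transcribed with a fuel counter set to the length)
def ascendA (w : List Int) (fuel s : Nat) : Nat :=
  match fuel with
  | 0 => s
  | fuel + 1 => if s < w.length - 1 ∧ w.getD s 0 ≤ w.getD (s + 1) 0 then ascendA w fuel (s + 1) else s

-- "while end > 0 and window[end - 1] <= window[end]: end -= 1"
def descendA (w : List Int) (e : Nat) : Nat :=
  match e with
  | 0 => 0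
  | e + 1 => if w.getD e 0 ≤ w.getD (e + 1) 0 then descendA w e else e + 1

-- "while start > 0 and window[start - 1] > min_unsorted: start -= 1"
def expandLA (w : List Int) (m : Int) (s : Nat) : Nat :=
  match s with
  | 0 => 0
  | s + 1 => if m < w.getD s 0 then expandLA w m s else s + 1

-- "while end < n - 1 and window[end + 1] < max_unsorted: end += 1"
def expandRA (w : List Int) (M : Int) (fuel e : Nat) : Nat :=
  match fuel with
  | 0 => e
  | fuel + 1 => if e < w.length - 1 ∧ w.getD (e + 1) 0 < M then expandRA w M fuel (e + 1) else e

-- min_unsorted_length(window).  On every admitted input (nonempty window) this is Python-exact; the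
-- `.getD 0` after min?/max? is never the default there because the slice window[start:end+1] is nonempty
-- (an EMPTY window makes Python raise ValueError on min([]) — such inputs are excluded by Pre_ below).
def minUnsortedLen (w : List Int) : Int :=
  let n := w.length
  let b := ascendA w n 0
  if b = n - 1 then 0
  else
    let e := descendA w (n - 1)
    let region := PySem.List.slice w (some (b : Int)) (some ((e : Int) + 1))
    let m := (PySem.List.min? region (fun x => x)).getD 0
    let M := (PySem.List.max? region (fun x => x)).getD 0
    let s := expandLA w m b
    let e' := expandRA w M n e
    ((e' - s + 1 : Nat) : Int)

def minSubarraySort (nums : List Int) (k : Int) : List Int :=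
  (PySem.List.pyRange 0 ((nums.length : Int) - k + 1) 1).foldl
    (fun ans start => ans ++ [minUnsortedLen (PySem.List.slice nums (some start) (some (start + k)))]) []

-- ===== PORT B =====
-- helper(w): sort a copy, collect mismatch positions, answer = last - first + 1 (0 if none).
def minUnsortedLenAlt (w : List Int) : Int :=
  let s := PySem.List.sorted w (fun x => x) false
  let mism := (List.range w.length).filter (fun i => w.getD i 0 != s.getD i 0)
  match mism with
  | [] => 0
  | _ => ((mism.getLastD 0 - mism.headD 0 + 1 : Nat) : Int)

def minSubarraySort_alt (nums : List Int) (k : Int) : List Int :=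
  (PySem.List.pyRange 0 ((nums.length : Int) - k + 1) 1).map
    (fun i => minUnsortedLenAlt (PySem.List.slice nums (some i) (some (i + k))))

-- ===== PRECONDITION & SPEC =====
-- Pre_ excludes exactly k ≤ 0: there the last windows nums[start:start+k] are empty and Python A
-- raises ValueError on min([]).  For every k ≥ 1 A returns normally.
def Pre_minSubarraySort (nums : List Int) (k : Int) : Prop := 1 ≤ k
instance (nums : List Int) (k : Int) : Decidable (Pre_minSubarraySort nums k) := by unfold Pre_minSubarraySort; infer_instance

def pvWitness_minSubarraySort : List Int × Int := ([3, 1, 2, 5, 4], 3)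

def Spec_minSubarraySort (nums : List Int) (k : Int) (out : List Int) : Prop := out = minSubarraySort_alt nums k
instance (nums : List Int) (k : Int) (out : List Int) : Decidable (Spec_minSubarraySort nums k out) := by unfold Spec_minSubarraySort; infer_instance

-- ===== CLAIM (what is proved, stated in full; the proofs are below) =====
def Claim_equal_minSubarraySort : Prop := ∀ (nums : List Int) (k : Int), Dom_minSubarraySort nums k → Pre_minSubarraySort nums k → Spec_minSubarraySort nums k (minSubarraySort nums k)

-- ===== LEMMAS AND PROOFS =====

theorem ascendA_spec (w : List Int) (fuel s : Nat) : w.length - 1 ≤ s + fuel → s ≤ w.length - 1 →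
    (∀ t, s ≤ t → t < ascendA w fuel s → w.getD t 0 ≤ w.getD (t + 1) 0) ∧
    s ≤ ascendA w fuel s ∧ ascendA w fuel s ≤ w.length - 1 ∧
    (ascendA w fuel s = w.length - 1 ∨ w.getD (ascendA w fuel s + 1) 0 < w.getD (ascendA w fuel s) 0) := by
  induction fuel generalizing s with
  | zero =>
    intro h1 h2
    simp only [ascendA]
    exact ⟨fun t ht1 ht2 => absurd ht2 (by omega), le_refl _, h2, Or.inl (by omega)⟩
  | succ fuel ih =>
    intro h1 h2
    by_cases h : s < w.length - 1 ∧ w.getD s 0 ≤ w.getD (s + 1) 0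
    · have hrw : ascendA w (fuel + 1) s = ascendA w fuel (s + 1) := by
        simp only [ascendA, if_pos h]
      rw [hrw]
      obtain ⟨ch, hle, hub, hlast⟩ := ih (s + 1) (by omega) (by omega)
      refine ⟨?_, by omega, hub, hlast⟩
      intro t ht1 ht2
      rcases Nat.eq_or_lt_of_le ht1 with rfl | ht1'
      · exact h.2
      · exact ch t (by omega) ht2
    · have hrw : ascendA w (fuel + 1) s = s := by
        simp only [ascendA, if_neg h]
      rw [hrw]
      push Not at h
      refine ⟨fun t ht1 ht2 => absurd ht2 (by omega), le_refl _, h2, ?_⟩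
      by_cases hc : s < w.length - 1
      · exact Or.inr (h hc)
      · exact Or.inl (by omega)

theorem descendA_spec (w : List Int) (e : Nat) :
    descendA w e ≤ e ∧
    (∀ t, descendA w e ≤ t → t < e → w.getD t 0 ≤ w.getD (t + 1) 0) ∧
    (descendA w e = 0 ∨ w.getD (descendA w e) 0 < w.getD (descendA w e - 1) 0) := by
  induction e with
  | zero =>
    exact ⟨le_refl _, fun t h1 h2 => absurd h2 (by omega), Or.inl rfl⟩
  | succ e ih =>
    by_cases h : w.getD e 0 ≤ w.getD (e + 1) 0
    · have hrw : descendA w (e + 1) = descendA w e := by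
        simp only [descendA, if_pos h]
      rw [hrw]
      obtain ⟨h1, h2, h3⟩ := ih
      refine ⟨by omega, ?_, h3⟩
      intro t ht1 ht2
      rcases Nat.lt_or_ge t e with h4 | h4
      · exact h2 t ht1 h4
      · have : t = e := by omega
        subst this
        exact h
    · have hrw : descendA w (e + 1) = e + 1 := by
        simp only [descendA, if_neg h]
      rw [hrw]
      refine ⟨le_refl _, fun t h1 h2 => absurd h2 (by omega), Or.inr ?_⟩
      simp only [Nat.add_sub_cancel]
      exact not_le.mp h

theorem expandLA_spec (w : List Int) (m : Int) (s : Nat) :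
    expandLA w m s ≤ s ∧
    (∀ t, expandLA w m s ≤ t → t < s → m < w.getD t 0) ∧
    (expandLA w m s = 0 ∨ w.getD (expandLA w m s - 1) 0 ≤ m) := by
  induction s with
  | zero =>
    exact ⟨le_refl _, fun t h1 h2 => absurd h2 (by omega), Or.inl rfl⟩
  | succ s ih =>
    by_cases h : m < w.getD s 0
    · have hrw : expandLA w m (s + 1) = expandLA w m s := by
        simp only [expandLA, if_pos h]
      rw [hrw]
      obtain ⟨h1, h2, h3⟩ := ih
      refine ⟨by omega, ?_, h3⟩
      intro t ht1 ht2
      rcases Nat.lt_or_ge t s with h4 | h4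
      · exact h2 t ht1 h4
      · have : t = s := by omega
        subst this
        exact h
    · have hrw : expandLA w m (s + 1) = s + 1 := by
        simp only [expandLA, if_neg h]
      rw [hrw]
      refine ⟨le_refl _, fun t h1 h2 => absurd h2 (by omega), Or.inr ?_⟩
      simp only [Nat.add_sub_cancel]
      exact not_lt.mp h

theorem expandRA_spec (w : List Int) (M : Int) (fuel e : Nat) : w.length - 1 ≤ e + fuel → e ≤ w.length - 1 →
    e ≤ expandRA w M fuel e ∧ expandRA w M fuel e ≤ w.length - 1 ∧
    (∀ t, e < t → t ≤ expandRA w M fuel e → w.getD t 0 < M) ∧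
    (expandRA w M fuel e = w.length - 1 ∨ M ≤ w.getD (expandRA w M fuel e + 1) 0) := by
  induction fuel generalizing e with
  | zero =>
    intro h1 h2
    simp only [expandRA]
    exact ⟨le_refl _, h2, fun t ht1 ht2 => absurd ht2 (by omega), Or.inl (by omega)⟩
  | succ fuel ih =>
    intro h1 h2
    by_cases h : e < w.length - 1 ∧ w.getD (e + 1) 0 < M
    · have hrw : expandRA w M (fuel + 1) e = expandRA w M fuel (e + 1) := by
        simp only [expandRA, if_pos h]
      rw [hrw]
      obtain ⟨hle, hub, ch, hlast⟩ := ih (e + 1) (by omega) (by omega)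
      refine ⟨by omega, hub, ?_, hlast⟩
      intro t ht1 ht2
      rcases Nat.lt_or_ge (e + 1) t with h3 | h3
      · exact ch t h3 ht2
      · have : t = e + 1 := by omega
        subst this
        exact h.2
    · have hrw : expandRA w M (fuel + 1) e = e := by
        simp only [expandRA, if_neg h]
      rw [hrw]
      push Not at h
      refine ⟨le_refl _, h2, fun t ht1 ht2 => absurd ht2 (by omega), ?_⟩
      by_cases hc : e < w.length - 1
      · exact Or.inr (le_of_not_gt (fun hgt => absurd (h hc) (not_le_of_gt hgt)))
      · exact Or.inl (by omega)

theorem chain_mono (g : Nat → Int) (lo hi : Nat)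
    (h : ∀ t, lo ≤ t → t < hi → g t ≤ g (t + 1)) :
    ∀ p q, lo ≤ p → p ≤ q → q ≤ hi → g p ≤ g q := by
  intro p q hp hpq hq
  induction q with
  | zero =>
    have : p = 0 := by omega
    subst this; exact le_refl _
  | succ q ih =>
    rcases Nat.eq_or_lt_of_le hpq with rfl | hlt
    · exact le_refl _
    · exact le_trans (ih (by omega) (by omega)) (h q (by omega) (by omega))

theorem getLastD_mem_or {α : Type} (l : List α) (d : α) : l.getLastD d = d ∨ l.getLastD d ∈ l := by
  induction l generalizing d with
  | nil => exact Or.inl rfl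
  | cons a t ih =>
    rw [List.getLastD_cons]
    rcases ih a with h | h
    · rw [h]; exact Or.inr List.mem_cons_self
    · exact Or.inr (List.mem_cons_of_mem _ h)

theorem getLastD_mem {α : Type} (l : List α) (d : α) (h : l ≠ []) : l.getLastD d ∈ l := by
  cases l with
  | nil => exact absurd rfl h
  | cons a t =>
    rw [List.getLastD_cons]
    rcases getLastD_mem_or t a with h1 | h1
    · rw [h1]; exact List.mem_cons_self
    · exact List.mem_cons_of_mem _ h1

theorem le_getLastD_of_pairwise (l : List Nat) (d : Nat) (hp : l.Pairwise (· < ·)) :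
    ∀ x ∈ l, x ≤ l.getLastD d := by
  induction l generalizing d with
  | nil => intro x hx; simp at hx
  | cons a t ih =>
    rw [List.pairwise_cons] at hp
    intro x hx
    rw [List.getLastD_cons]
    rcases List.mem_cons.mp hx with rfl | hx'
    · rcases getLastD_mem_or t x with h | h
      · omega
      · exact le_of_lt (hp.1 _ h)
    · exact ih a hp.2 x hx'

-- head/last of a filtered range: least and greatest index satisfying p
theorem filter_range_facts (n : Nat) (p : Nat → Bool)
    (h : (List.range n).filter p ≠ []) :
    ((List.range n).filter p).headD 0 < n ∧ p (((List.range n).filter p).headD 0) = true ∧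
    (∀ t, t < ((List.range n).filter p).headD 0 → p t = false) ∧
    ((List.range n).filter p).getLastD 0 < n ∧ p (((List.range n).filter p).getLastD 0) = true ∧
    (∀ t, ((List.range n).filter p).getLastD 0 < t → t < n → p t = false) ∧
    ((List.range n).filter p).headD 0 ≤ ((List.range n).filter p).getLastD 0 := by
  set l := (List.range n).filter p with hl
  have hpw : l.Pairwise (· < ·) := List.Pairwise.filter p List.pairwise_lt_range
  have hmem : ∀ x, x ∈ l ↔ (x < n ∧ p x = true) := by
    intro x; rw [hl, List.mem_filter, List.mem_range]
  obtain ⟨a, tl, hcons⟩ := List.exists_cons_of_ne_nil h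
  have hhead : l.headD 0 = a := by rw [hcons]; rfl
  have hheadmem : l.headD 0 ∈ l := by rw [hhead, hcons]; exact List.mem_cons_self
  have hlastmem : l.getLastD 0 ∈ l := getLastD_mem l 0 h
  obtain ⟨hh1, hh2⟩ := (hmem _).mp hheadmem
  obtain ⟨hl1, hl2⟩ := (hmem _).mp hlastmem
  refine ⟨hh1, hh2, ?_, hl1, hl2, ?_, ?_⟩
  · intro t ht
    by_contra hpt
    have htl : t ∈ l := (hmem t).mpr ⟨by omega, by simpa using hpt⟩
    rw [hcons, List.mem_cons] at htl
    rw [hhead] at ht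
    rcases htl with rfl | htl'
    · omega
    · have := (List.pairwise_cons.mp (hcons ▸ hpw)).1 t htl'
      omega
  · intro t ht1 ht2
    by_contra hpt
    have htl : t ∈ l := (hmem t).mpr ⟨ht2, by simpa using hpt⟩
    have := le_getLastD_of_pairwise l 0 hpw t htl
    omega
  · exact le_getLastD_of_pairwise l 0 hpw _ hheadmem

theorem mem_drop_take_iff (w : List Int) (b c : Nat) (x : Int) :
    x ∈ (w.drop b).take c ↔ ∃ t, b ≤ t ∧ t < b + c ∧ t < w.length ∧ w.getD t 0 = x := by
  constructor
  · intro hx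
    obtain ⟨j, hj, hjx⟩ := List.mem_iff_getElem.mp hx
    have hj' : j < c ∧ b + j < w.length := by
      simp only [List.length_take, List.length_drop] at hj; omega
    refine ⟨b + j, by omega, by omega, by omega, ?_⟩
    rw [List.getElem_take, List.getElem_drop] at hjx
    rw [List.getD_eq_getElem w 0 (by omega)]
    exact hjx
  · rintro ⟨t, h1, h2, h3, h4⟩
    apply List.mem_iff_getElem.mpr
    refine ⟨t - b, by simp only [List.length_take, List.length_drop]; omega, ?_⟩
    rw [List.getElem_take, List.getElem_drop]
    rw [List.getD_eq_getElem w 0 h3] at h4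
    have hbt : b + (t - b) = t := by omega
    simp only [hbt]
    exact h4

theorem ss_mono (w : List Int) (p q : Nat) (hpq : p ≤ q) (hq : q < w.length) :
    (PySem.List.sorted w (fun x => x) false).getD p 0 ≤ (PySem.List.sorted w (fun x => x) false).getD q 0 := by
  have hlen := PySem.List.length_sorted w (fun x => x) false
  rw [List.getD_eq_getElem _ 0 (by omega), List.getD_eq_getElem _ 0 (by omega)]
  exact PySem.List.sorted_id_getElem_mono w hpq (by omega)

theorem take_eq_of_agree (w : List Int) (c : Nat)
    (h : ∀ r, r < c → w.getD r 0 = (PySem.List.sorted w (fun x => x) false).getD r 0) :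
    w.take c = (PySem.List.sorted w (fun x => x) false).take c := by
  have hlen := PySem.List.length_sorted w (fun x => x) false
  apply List.ext_getElem
  · simp [hlen]
  · intro i h1 h2
    simp only [List.getElem_take]
    have hi : i < w.length := by simp only [List.length_take] at h1; omega
    have hic : i < c := by simp only [List.length_take] at h1; omega
    rw [← List.getD_eq_getElem w 0 hi, ← List.getD_eq_getElem _ 0 (by omega)]
    exact h i hic

theorem drop_eq_of_agree (w : List Int) (c : Nat)
    (h : ∀ r, c ≤ r → r < w.length → w.getD r 0 = (PySem.List.sorted w (fun x => x) false).getD r 0) :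
    w.drop c = (PySem.List.sorted w (fun x => x) false).drop c := by
  have hlen := PySem.List.length_sorted w (fun x => x) false
  apply List.ext_getElem
  · simp [hlen]
  · intro i h1 h2
    simp only [List.getElem_drop]
    have hi : c + i < w.length := by simp only [List.length_drop] at h1; omega
    rw [← List.getD_eq_getElem w 0 hi, ← List.getD_eq_getElem _ 0 (by omega)]
    exact h (c + i) (by omega) hi

theorem drop_perm_of_agree (w : List Int) (c : Nat)
    (h : ∀ r, r < c → w.getD r 0 = (PySem.List.sorted w (fun x => x) false).getD r 0) :
    (w.drop c).Perm ((PySem.List.sorted w (fun x => x) false).drop c) := by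
  have hp := PySem.List.sorted_perm w (fun x => x) false
  have ht := take_eq_of_agree w c h
  have h1 : w.Perm (w.take c ++ (PySem.List.sorted w (fun x => x) false).drop c) := by
    rw [ht, List.take_append_drop]
    exact hp.symm
  have h2 : (w.take c ++ w.drop c).Perm (w.take c ++ (PySem.List.sorted w (fun x => x) false).drop c) := by
    rw [List.take_append_drop]; exact h1
  exact (List.perm_append_left_iff _).mp h2

theorem take_perm_of_agree (w : List Int) (c : Nat)
    (h : ∀ r, c ≤ r → r < w.length → w.getD r 0 = (PySem.List.sorted w (fun x => x) false).getD r 0) :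
    (w.take c).Perm ((PySem.List.sorted w (fun x => x) false).take c) := by
  have hp := PySem.List.sorted_perm w (fun x => x) false
  have hd := drop_eq_of_agree w c h
  have h1 : w.Perm ((PySem.List.sorted w (fun x => x) false).take c ++ w.drop c) := by
    rw [hd, List.take_append_drop]
    exact hp.symm
  have h2 : (w.take c ++ w.drop c).Perm ((PySem.List.sorted w (fun x => x) false).take c ++ w.drop c) := by
    rw [List.take_append_drop]; exact h1
  exact (List.perm_append_right_iff _).mp h2

theorem getD_mem_drop (l : List Int) (c u : Nat) (hcu : c ≤ u) (hu : u < l.length) :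
    l.getD u 0 ∈ l.drop c := by
  apply List.mem_iff_getElem.mpr
  refine ⟨u - c, by simp only [List.length_drop]; omega, ?_⟩
  rw [List.getElem_drop]
  have hc : c + (u - c) = u := by omega
  simp only [hc]
  exact (List.getD_eq_getElem l 0 hu).symm

theorem mem_drop_getD (l : List Int) (c : Nat) (x : Int) (hx : x ∈ l.drop c) :
    ∃ v, c ≤ v ∧ v < l.length ∧ l.getD v 0 = x := by
  obtain ⟨j, hj, hjx⟩ := List.mem_iff_getElem.mp hx
  simp only [List.length_drop] at hj
  refine ⟨c + j, by omega, by omega, ?_⟩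
  rw [List.getD_eq_getElem _ 0 (by omega)]
  rw [List.getElem_drop] at hjx
  exact hjx

theorem getD_mem_take (l : List Int) (c u : Nat) (hu : u < c) (hu2 : u < l.length) :
    l.getD u 0 ∈ l.take c := by
  apply List.mem_iff_getElem.mpr
  refine ⟨u, by simp only [List.length_take]; omega, ?_⟩
  rw [List.getElem_take]
  exact (List.getD_eq_getElem l 0 hu2).symm

theorem mem_take_getD (l : List Int) (c : Nat) (x : Int) (hx : x ∈ l.take c) :
    ∃ v, v < c ∧ v < l.length ∧ l.getD v 0 = x := by
  obtain ⟨j, hj, hjx⟩ := List.mem_iff_getElem.mp hx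
  simp only [List.length_take] at hj
  refine ⟨j, by omega, by omega, ?_⟩
  rw [List.getD_eq_getElem _ 0 (by omega)]
  rw [List.getElem_take] at hjx
  exact hjx

theorem notbad_left (w : List Int) (t u : Nat) (hu : u < w.length) (htu : t < u)
    (h : ∀ r, r ≤ t → w.getD r 0 = (PySem.List.sorted w (fun x => x) false).getD r 0) :
    w.getD t 0 ≤ w.getD u 0 := by
  have hlen := PySem.List.length_sorted w (fun x => x) false
  have hperm := drop_perm_of_agree w (t + 1) (fun r hr => h r (by omega))
  have hmem : w.getD u 0 ∈ w.drop (t + 1) := getD_mem_drop w (t + 1) u (by omega) hu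
  have hmem2 := hperm.mem_iff.mp hmem
  obtain ⟨v, hv1, hv2, hv3⟩ := mem_drop_getD _ _ _ hmem2
  rw [hlen] at hv2
  have hm := ss_mono w t v (by omega) hv2
  rw [h t (le_refl t), ← hv3]
  exact hm

theorem bad_left (w : List Int) (i : Nat) (hi : i < w.length)
    (hag : ∀ r, r < i → w.getD r 0 = (PySem.List.sorted w (fun x => x) false).getD r 0)
    (hne : w.getD i 0 ≠ (PySem.List.sorted w (fun x => x) false).getD i 0) :
    ∃ u, i < u ∧ u < w.length ∧ w.getD u 0 < w.getD i 0 := by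
  have hlen := PySem.List.length_sorted w (fun x => x) false
  have hperm := drop_perm_of_agree w i hag
  have h1 : (PySem.List.sorted w (fun x => x) false).getD i 0 ∈ (PySem.List.sorted w (fun x => x) false).drop i :=
    getD_mem_drop _ i i (le_refl i) (by omega)
  have h2 := hperm.mem_iff.mpr h1
  obtain ⟨u, hu1, hu2, hu3⟩ := mem_drop_getD w i _ h2
  have h3 : w.getD i 0 ∈ w.drop i := getD_mem_drop w i i (le_refl i) hi
  have h4 := hperm.mem_iff.mp h3
  obtain ⟨v, hv1, hv2, hv3⟩ := mem_drop_getD _ i _ h4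
  rw [hlen] at hv2
  have h5 := ss_mono w i v hv1 hv2
  rw [hv3] at h5
  have h6 : (PySem.List.sorted w (fun x => x) false).getD i 0 < w.getD i 0 :=
    lt_of_le_of_ne h5 (Ne.symm hne)
  have hune : u ≠ i := fun heq => hne (by rw [heq] at hu3; exact hu3)
  exact ⟨u, by omega, hu2, by rw [hu3]; exact h6⟩

theorem notbad_right (w : List Int) (t u : Nat) (ht : t < w.length) (hut : u < t)
    (h : ∀ r, t ≤ r → r < w.length → w.getD r 0 = (PySem.List.sorted w (fun x => x) false).getD r 0) :
    w.getD u 0 ≤ w.getD t 0 := by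
  have hlen := PySem.List.length_sorted w (fun x => x) false
  have hperm := take_perm_of_agree w t h
  have hmem : w.getD u 0 ∈ w.take t := getD_mem_take w t u hut (by omega)
  have hmem2 := hperm.mem_iff.mp hmem
  obtain ⟨v, hv1, hv2, hv3⟩ := mem_take_getD _ _ _ hmem2
  have hm := ss_mono w v t (by omega) ht
  calc w.getD u 0 = (PySem.List.sorted w (fun x => x) false).getD v 0 := hv3.symm
    _ ≤ (PySem.List.sorted w (fun x => x) false).getD t 0 := hm
    _ = w.getD t 0 := (h t (le_refl t) ht).symm

theorem bad_right (w : List Int) (j : Nat) (hj : j < w.length)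
    (hag : ∀ r, j < r → r < w.length → w.getD r 0 = (PySem.List.sorted w (fun x => x) false).getD r 0)
    (hne : w.getD j 0 ≠ (PySem.List.sorted w (fun x => x) false).getD j 0) :
    ∃ u, u < j ∧ w.getD j 0 < w.getD u 0 := by
  have hlen := PySem.List.length_sorted w (fun x => x) false
  have hperm := take_perm_of_agree w (j + 1) (fun r h1 h2 => hag r (by omega) h2)
  have h1 : (PySem.List.sorted w (fun x => x) false).getD j 0 ∈ (PySem.List.sorted w (fun x => x) false).take (j + 1) :=
    getD_mem_take _ (j + 1) j (by omega) (by omega)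
  have h2 := hperm.mem_iff.mpr h1
  obtain ⟨u, hu1, hu2, hu3⟩ := mem_take_getD w (j + 1) _ h2
  have h3 : w.getD j 0 ∈ w.take (j + 1) := getD_mem_take w (j + 1) j (by omega) hj
  have h4 := hperm.mem_iff.mp h3
  obtain ⟨v, hv1, hv2, hv3⟩ := mem_take_getD _ (j + 1) _ h4
  rw [hlen] at hv2
  have h5 := ss_mono w v j (by omega) hj
  rw [hv3] at h5
  have h6 : w.getD j 0 < (PySem.List.sorted w (fun x => x) false).getD j 0 := lt_of_le_of_ne h5 hne
  have hune : u ≠ j := fun heq => hne (by rw [heq] at hu3; exact hu3)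
  exact ⟨u, by omega, by rw [hu3]; exact h6⟩

theorem ss_eq_of_chain (w : List Int)
    (hch : ∀ t, t < w.length - 1 → w.getD t 0 ≤ w.getD (t + 1) 0) :
    PySem.List.sorted w (fun x => x) false = w := by
  apply PySem.List.sorted_eq_self_of_pairwise
  apply List.pairwise_iff_getElem.mpr
  intro i j hi hj hij
  have hm := chain_mono (fun t => w.getD t 0) 0 (w.length - 1) (fun t _ ht => hch t ht) i j (by omega) (by omega) (by omega)
  simp only at hm
  rw [List.getD_eq_getElem w 0 hi, List.getD_eq_getElem w 0 hj] at hm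
  exact hm

theorem inner_eq (w : List Int) : minUnsortedLen w = minUnsortedLenAlt w := by
  have hlen := PySem.List.length_sorted w (fun x => x) false
  simp only [minUnsortedLen, minUnsortedLenAlt]
  by_cases hb : ascendA w w.length 0 = w.length - 1
  · rw [if_pos hb]
    obtain ⟨ch0, -, -, -⟩ := ascendA_spec w w.length 0 (by omega) (by omega)
    have hchain : ∀ t, t < w.length - 1 → w.getD t 0 ≤ w.getD (t + 1) 0 := by
      intro t ht
      exact ch0 t (by omega) (by omega)
    have hss := ss_eq_of_chain w hchain
    have hfil : (List.range w.length).filter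
        (fun i => w.getD i 0 != (PySem.List.sorted w (fun x => x) false).getD i 0) = [] := by
      apply List.filter_eq_nil_iff.mpr
      intro a ha
      rw [hss]
      simp
    rw [hfil]
  · rw [if_neg hb]
    obtain ⟨ch0, -, hble, hbor⟩ := ascendA_spec w w.length 0 (by omega) (by omega)
    set n := w.length with hn
    set b := ascendA w n 0 with hbdef
    have hblt : b < n - 1 := by omega
    have hbdesc : w.getD (b + 1) 0 < w.getD b 0 := by
      rcases hbor with h | h
      · exact absurd h hb
      · exact h
    have ch0' : ∀ t, 0 ≤ t → t < b → w.getD t 0 ≤ w.getD (t + 1) 0 :=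
      fun t _ ht => ch0 t (by omega) ht
    obtain ⟨hele, chE, heor⟩ := descendA_spec w (n - 1)
    set e := descendA w (n - 1) with hedef
    have hbe : b < e := by
      by_contra hc
      exact absurd (chE b (by omega) hblt) (not_le.mpr hbdesc)
    have hedesc : w.getD e 0 < w.getD (e - 1) 0 := by
      rcases heor with h | h
      · omega
      · exact h
    have hreg : PySem.List.slice w (some (b : Int)) (some ((e : Int) + 1)) = (w.drop b).take (e + 1 - b) := by
      have hcast : ((e : Int) + 1) = (((e + 1 : Nat)) : Int) := by push_cast; ring
      rw [hcast, PySem.List.slice_natCast]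
    rw [hreg]
    set region := (w.drop b).take (e + 1 - b) with hregdef
    have hregne : region ≠ [] := by
      have hrl : region.length = min (e + 1 - b) (n - b) := by
        rw [hregdef, List.length_take, List.length_drop]
      intro hnil
      rw [hnil] at hrl
      simp only [List.length_nil] at hrl
      omega
    obtain ⟨m, hmin⟩ : ∃ m, PySem.List.min? region (fun x => x) = some m := by
      cases hminc : PySem.List.min? region (fun x => x) with
      | none =>
        rw [PySem.List.min?_eq_none_iff] at hminc
        exact absurd hminc hregne
      | some m => exact ⟨m, rfl⟩
    obtain ⟨M, hmax⟩ : ∃ M, PySem.List.max? region (fun x => x) = some M := by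
      cases hmaxc : PySem.List.max? region (fun x => x) with
      | none =>
        rw [PySem.List.max?_eq_none_iff] at hmaxc
        exact absurd hmaxc hregne
      | some M => exact ⟨M, rfl⟩
    rw [hmin, hmax]
    simp only [Option.getD_some]
    have hmemiff : ∀ x, x ∈ region ↔ ∃ t, b ≤ t ∧ t ≤ e ∧ w.getD t 0 = x := by
      intro x
      rw [hregdef, mem_drop_take_iff]
      constructor
      · rintro ⟨t, h1, h2, h3, h4⟩
        exact ⟨t, h1, by omega, h4⟩
      · rintro ⟨t, h1, h2, h4⟩
        exact ⟨t, h1, by omega, by omega, h4⟩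
    obtain ⟨u0, hu01, hu02, hu03⟩ := (hmemiff m).mp (PySem.List.min?_mem hmin)
    have hm_min' : ∀ t, b ≤ t → t ≤ e → m ≤ w.getD t 0 := fun t h1 h2 =>
      PySem.List.min?_isMin hmin _ ((hmemiff _).mpr ⟨t, h1, h2, rfl⟩)
    obtain ⟨v0, hv01, hv02, hv03⟩ := (hmemiff M).mp (PySem.List.max?_mem hmax)
    have hM_max' : ∀ t, b ≤ t → t ≤ e → w.getD t 0 ≤ M := fun t h1 h2 =>
      PySem.List.max?_isMax hmax _ ((hmemiff _).mpr ⟨t, h1, h2, rfl⟩)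
    have hmb : m < w.getD b 0 := lt_of_le_of_lt (hm_min' (b + 1) (by omega) (by omega)) hbdesc
    have heM : w.getD e 0 < M := lt_of_lt_of_le hedesc (hM_max' (e - 1) (by omega) (by omega))
    obtain ⟨hsle, hsmid, hsor⟩ := expandLA_spec w m b
    set s := expandLA w m b with hsdef
    have Cs_lt : m < w.getD s 0 := by
      rcases Nat.eq_or_lt_of_le hsle with h | h
      · rw [h]; exact hmb
      · exact hsmid s (le_refl s) h
    have Cs_le : ∀ t, t < s → w.getD t 0 ≤ m := by
      intro t ht
      rcases hsor with h0 | hle'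
      · omega
      · have hmono := chain_mono (fun t => w.getD t 0) 0 b ch0' t (s - 1) (by omega) (by omega) (by omega)
        exact le_trans hmono hle'
    obtain ⟨helr, herub, hemid, heor2⟩ := expandRA_spec w M n e (by omega) (by omega)
    set e' := expandRA w M n e with he'def
    have Ce_lt : w.getD e' 0 < M := by
      rcases Nat.eq_or_lt_of_le helr with h | h
      · rw [← h]; exact heM
      · exact hemid e' h (le_refl e')
    have Ce_ge : ∀ t, e' < t → t < n → M ≤ w.getD t 0 := by
      intro t h1 h2
      rcases heor2 with hE | hge
      · omega
      · have hmono := chain_mono (fun t => w.getD t 0) e (n - 1) chE (e' + 1) t (by omega) (by omega) (by omega)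
        exact le_trans hge hmono
    set p : Nat → Bool := fun i => w.getD i 0 != (PySem.List.sorted w (fun x => x) false).getD i 0 with hpdef
    have hpT : ∀ t, p t = true → w.getD t 0 ≠ (PySem.List.sorted w (fun x => x) false).getD t 0 := by
      intro t h
      rw [hpdef] at h
      simpa using h
    have hpF : ∀ t, p t = false → w.getD t 0 = (PySem.List.sorted w (fun x => x) false).getD t 0 := by
      intro t h
      rw [hpdef] at h
      simpa using h
    have hfne : (List.range n).filter p ≠ [] := by
      intro hnil
      have hchain : ∀ t, t < n - 1 → w.getD t 0 ≤ w.getD (t + 1) 0 := by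
        intro t ht
        have h1 := hpF t (eq_false_of_ne_true (List.filter_eq_nil_iff.mp hnil t (List.mem_range.mpr (by omega))))
        have h2 := hpF (t + 1) (eq_false_of_ne_true (List.filter_eq_nil_iff.mp hnil (t + 1) (List.mem_range.mpr (by omega))))
        rw [h1, h2]
        exact ss_mono w t (t + 1) (by omega) (by omega)
      exact absurd (chain_mono (fun t => w.getD t 0) 0 b ch0' b b (by omega) (le_refl b) (le_refl b)) (by
        exact absurd (hchain b (by omega)) (not_le.mpr hbdesc))
    obtain ⟨hi0n, hpi0, hi0min, hj0n, hpj0, hj0max, -⟩ := filter_range_facts n p hfne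
    have hagL : ∀ r, r < ((List.range n).filter p).headD 0 → w.getD r 0 = (PySem.List.sorted w (fun x => x) false).getD r 0 :=
      fun r hr => hpF r (hi0min r hr)
    have hagR : ∀ r, ((List.range n).filter p).getLastD 0 < r → r < w.length → w.getD r 0 = (PySem.List.sorted w (fun x => x) false).getD r 0 :=
      fun r h1 h2 => hpF r (hj0max r h1 h2)
    set i0 := ((List.range n).filter p).headD 0 with hi0def
    set j0 := ((List.range n).filter p).getLastD 0 with hj0def
    have Bi_lt : m < w.getD i0 0 := by
      obtain ⟨u, hu1, hu2, hu3⟩ := bad_left w i0 (by omega) hagL (hpT i0 hpi0)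
      have hmu : m ≤ w.getD u 0 := by
        rcases Nat.lt_or_ge u b with hub | hub
        · exact absurd (chain_mono (fun t => w.getD t 0) 0 b ch0' i0 u (by omega) (by omega) (by omega)) (not_le.mpr hu3)
        · rcases Nat.lt_or_ge u (e + 1) with hue | hue
          · exact hm_min' u hub (by omega)
          · exact le_trans (hm_min' e (by omega) (le_refl e))
              (chain_mono (fun t => w.getD t 0) e (n - 1) chE e u (le_refl e) (by omega) (by omega))
      exact lt_of_le_of_lt hmu hu3
    have Bi_le : ∀ t, t < i0 → w.getD t 0 ≤ m := by
      intro t ht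
      rcases Nat.lt_trichotomy t u0 with h1 | h1 | h1
      · have hnb := notbad_left w t u0 (by omega) h1 (fun r hr => hagL r (by omega))
        rw [hu03] at hnb
        exact hnb
      · rw [h1, hu03]
      · exfalso
        have e1 := hagL b (by omega)
        have e2 := hagL (b + 1) (by omega)
        have hmono := ss_mono w b (b + 1) (by omega) (by omega)
        rw [← e1, ← e2] at hmono
        exact absurd hmono (not_le.mpr hbdesc)
    have hs_eq : s = i0 := by
      rcases Nat.lt_trichotomy s i0 with h | h | h
      · exact absurd (Bi_le s h) (not_le.mpr Cs_lt)
      · exact h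
      · exact absurd (Cs_le i0 h) (not_le.mpr Bi_lt)
    have Bj_lt : w.getD j0 0 < M := by
      obtain ⟨u, hu1, hu3⟩ := bad_right w j0 (by omega) hagR (hpT j0 hpj0)
      have hMu : w.getD u 0 ≤ M := by
        rcases Nat.lt_or_ge u b with hub | hub
        · exact le_trans (chain_mono (fun t => w.getD t 0) 0 b ch0' u b (by omega) (by omega) (le_refl b))
            (hM_max' b (le_refl b) (by omega))
        · rcases Nat.lt_or_ge u (e + 1) with hue | hue
          · exact hM_max' u hub (by omega)
          · exact absurd (chain_mono (fun t => w.getD t 0) e (n - 1) chE u j0 (by omega) (by omega) (by omega)) (not_le.mpr hu3)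
      exact lt_of_lt_of_le hu3 hMu
    have Bj_ge : ∀ t, j0 < t → t < n → M ≤ w.getD t 0 := by
      intro t h1 h2
      rcases Nat.lt_trichotomy v0 t with h3 | h3 | h3
      · have hnb := notbad_right w t v0 (by omega) h3 (fun r hr1 hr2 => hagR r (by omega) hr2)
        rw [hv03] at hnb
        exact hnb
      · rw [← h3, hv03]
      · exfalso
        have e1 := hagR (e - 1) (by omega) (by omega)
        have e2 := hagR e (by omega) (by omega)
        have hmono := ss_mono w (e - 1) e (by omega) (by omega)
        rw [← e1, ← e2] at hmono
        exact absurd hmono (not_le.mpr hedesc)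
    have he_eq : e' = j0 := by
      rcases Nat.lt_trichotomy e' j0 with h | h | h
      · exact absurd (Ce_ge j0 h hj0n) (not_le.mpr Bj_lt)
      · exact h
      · exact absurd (Bj_ge e' h (by omega)) (not_le.mpr Ce_lt)
    obtain ⟨a, tl, hcons⟩ := List.exists_cons_of_ne_nil hfne
    rw [hcons]
    show ((e' - s + 1 : Nat) : Int) = ((j0 - i0 + 1 : Nat) : Int)
    rw [hs_eq, he_eq]

-- ===== VERDICT (by name: the statement is the Claim_ definition above) =====
theorem minSubarraySort_spec : Claim_equal_minSubarraySort := by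
  intro nums k _ _
  unfold Spec_minSubarraySort minSubarraySort minSubarraySort_alt
  rw [PySem.List.foldl_append_singleton_eq_map]
  exact List.map_congr_left fun x _ => inner_eq _
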